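-- pv_equiv track=rewrite | github.com/SunsetMkt/rar | rar/compressor.py | encode_huffman_tables
-- ===== SOURCE A (Python) =====
-- def encode_huffman_tables(all_lengths):
--     """RLE-encode 430 Huffman bit-lengths into meta-symbols.
--
--     Returns (meta_syms, meta_extras) where meta_extras[i] = (value, bits).
--     Uses only literal (0–15) and zero-run (18, 19) symbols to avoid the
--     "repeat previous at index 0" edge case.
--     """
--     meta_syms = []
--     meta_extras = []
--     i = 0
--     n = len(all_lengths)
--
--     while i < n:
--         val = all_lengths[i]
--         if val == 0:
--             # Count zero run
--             run = 0
--             while i + run < n and all_lengths[i + run] == 0: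
--                 run += 1
--             while run > 0:
--                 if run >= 11:
--                     take = min(run, 138)
--                     meta_syms.append(19)
--                     meta_extras.append((take - 11, 7))
--                     run -= take
--                     i += take
--                 elif run >= 3:
--                     take = min(run, 10)
--                     meta_syms.append(18)
--                     meta_extras.append((take - 3, 3))
--                     run -= take
--                     i += take
--                 else:
--                     meta_syms.append(0)
--                     meta_extras.append((0, 0))
--                     run -= 1
--                     i += 1
--         else:
--             meta_syms.append(val)
--             meta_extras.append((0, 0))
--             i += 1
--
--     return meta_syms, meta_extras
-- ===== SOURCE B (Python) =====
-- def encode_huffman_tables(all_lengths):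
--     """Two-stage RLE: first build the (value, run-length) groups back-to-front
--     with a right fold, then emit each group in closed form — zero runs by a
--     single divmod(run, 138) instead of a greedy decrement loop."""
--     # stage 1: maximal equal runs, built from the right
--     groups = []  # kept in reverse order while folding; front of the fold = groups[-1]
--     for v in reversed(all_lengths):
--         if groups and groups[-1][0] == v:
--             groups[-1] = (v, groups[-1][1] + 1)
--         else:
--             groups.append((v, 1))
--     groups.reverse()
--     # stage 2: closed-form emission per group
--     syms, extras = [], []
--     for v, run in groups:
--         if v != 0:
--             syms += [v] * run
--             extras += [(0, 0)] * run
--         else: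
--             q, rem = divmod(run, 138)
--             syms += [19] * q
--             extras += [(127, 7)] * q
--             if rem >= 11:
--                 syms.append(19)
--                 extras.append((rem - 11, 7))
--             elif rem >= 3:
--                 syms.append(18)
--                 extras.append((rem - 3, 3))
--             else:
--                 syms += [0] * rem
--                 extras += [(0, 0)] * rem
--     return syms, extras
-- ===== Notes on version B (the rewrite author's own statement) =====
-- stated objective: alternative
-- what changed: B is a two-stage pipeline: it first builds the list of (value, run-length) groups back-to-front with a right fold, then emits each group in closed form, replacing A's greedy decrement-and-rescan while loop on zero runs by a single divmod(run, 138) formula.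
import Mathlib
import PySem

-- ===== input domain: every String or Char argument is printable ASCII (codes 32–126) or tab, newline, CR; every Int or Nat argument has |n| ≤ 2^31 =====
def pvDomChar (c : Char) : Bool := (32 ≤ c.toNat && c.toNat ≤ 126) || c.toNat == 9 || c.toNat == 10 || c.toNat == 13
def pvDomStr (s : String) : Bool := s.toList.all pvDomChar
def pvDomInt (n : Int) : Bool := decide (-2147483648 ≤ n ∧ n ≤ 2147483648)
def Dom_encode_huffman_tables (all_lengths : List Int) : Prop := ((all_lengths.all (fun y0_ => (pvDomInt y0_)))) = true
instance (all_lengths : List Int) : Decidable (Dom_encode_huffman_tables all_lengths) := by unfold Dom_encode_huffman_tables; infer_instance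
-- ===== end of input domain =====

-- B builds the (value, run-length) groups back-to-front with a right fold and then emits
-- each group in closed form (divmod instead of A's greedy decrement loop); return value only.

-- ===== PORT A =====
-- inner `while i + run < n and all_lengths[i + run] == 0: run += 1`,
-- written as the count of leading zeros of the current suffix
def pvCzr : List Int → Nat
  | [] => 0
  | x :: r => if x = 0 then pvCzr r + 1 else 0

-- termination facts for the loops, cited by name in decreasing_by
theorem pvDecMin138 (run : Nat) (h : ¬ run = 0) : run - min run 138 < run := by omega
theorem pvDecMin10 (run : Nat) (h : ¬ run = 0) : run - min run 10 < run := by omega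
theorem pvDecOne (run : Nat) (h : ¬ run = 0) : run - 1 < run := by omega

-- inner `while run > 0: …` chunk-emission loop of A (it never re-reads the list)
def pvConsume (run : Nat) : List Int × List (Int × Int) :=
  if h : run = 0 then ([], [])
  else if 11 ≤ run then
    (19 :: (pvConsume (run - min run 138)).1,
     (((min run 138 : Nat) : Int) - 11, 7) :: (pvConsume (run - min run 138)).2)
  else if 3 ≤ run then
    (18 :: (pvConsume (run - min run 10)).1,
     (((min run 10 : Nat) : Int) - 3, 3) :: (pvConsume (run - min run 10)).2)
  else
    ((0 : Int) :: (pvConsume (run - 1)).1, ((0 : Int), (0 : Int)) :: (pvConsume (run - 1)).2)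
  termination_by run
  decreasing_by
  · exact pvDecMin138 run h
  · exact pvDecMin10 run h
  · exact pvDecOne run h

theorem pvDecZero (val : Int) (rest : List Int) (h : val = 0) :
    ((val :: rest).drop (pvCzr (val :: rest))).length < (val :: rest).length := by
  simp only [pvCzr, if_pos h, List.length_drop, List.length_cons]; omega
theorem pvDecTail (val : Int) (rest : List Int) : rest.length < (val :: rest).length := by
  simp

-- outer `while i < n` loop; the cursor i becomes the current suffix
def pvALoop : List Int → List Int × List (Int × Int)
  | [] => ([], [])
  | val :: rest =>
    if h : val = 0 then
      ((pvConsume (pvCzr (val :: rest))).1 ++ (pvALoop ((val :: rest).drop (pvCzr (val :: rest)))).1,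
       (pvConsume (pvCzr (val :: rest))).2 ++ (pvALoop ((val :: rest).drop (pvCzr (val :: rest)))).2)
    else
      (val :: (pvALoop rest).1, ((0 : Int), (0 : Int)) :: (pvALoop rest).2)
  termination_by xs => xs.length
  decreasing_by
    · exact pvDecZero val rest h
    · exact pvDecTail val rest

def encode_huffman_tables (all_lengths : List Int) : List Int × (List (Int × Int)) :=
  pvALoop all_lengths

-- ===== PORT B =====
-- one step of B's stage 1: prepend v to the group list built so far
def pvStep (v : Int) (acc : List (Int × Nat)) : List (Int × Nat) :=
  match acc with
  | (w, k) :: t => if w = v then (v, k + 1) :: t else (v, 1) :: (w, k) :: t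
  | [] => [(v, 1)]

-- B's stage 1: `for v in reversed(all_lengths): …` = a right fold
def pvGroupsR (xs : List Int) : List (Int × Nat) := xs.foldr pvStep []

-- B's closed-form emission for a zero run: q, rem = divmod(run, 138)
def pvZeroClosed (run : Nat) : List Int × List (Int × Int) :=
  (List.replicate (run / 138) 19 ++
     (if 11 ≤ run % 138 then [19]
      else if 3 ≤ run % 138 then [18]
      else List.replicate (run % 138) 0),
   List.replicate (run / 138) ((127 : Int), (7 : Int)) ++
     (if 11 ≤ run % 138 then [(((run % 138 : Nat) : Int) - 11, 7)]
      else if 3 ≤ run % 138 then [(((run % 138 : Nat) : Int) - 3, 3)]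
      else List.replicate (run % 138) ((0 : Int), (0 : Int))))

def pvEmit (v : Int) (run : Nat) : List Int × List (Int × Int) :=
  if v ≠ 0 then (List.replicate run v, List.replicate run ((0 : Int), (0 : Int)))
  else pvZeroClosed run

-- B's stage 2: the `for v, run in groups` loop (list += is append)
def pvEmitAll : List (Int × Nat) → List Int × List (Int × Int)
  | [] => ([], [])
  | g :: gs => ((pvEmit g.1 g.2).1 ++ (pvEmitAll gs).1, (pvEmit g.1 g.2).2 ++ (pvEmitAll gs).2)

def encode_huffman_tables_alt (all_lengths : List Int) : List Int × (List (Int × Int)) :=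
  pvEmitAll (pvGroupsR all_lengths)

-- ===== PRECONDITION & SPEC =====
def Spec_encode_huffman_tables (all_lengths : List Int) (out : List Int × (List (Int × Int))) : Prop := out = encode_huffman_tables_alt all_lengths
instance (all_lengths : List Int) (out : List Int × (List (Int × Int))) : Decidable (Spec_encode_huffman_tables all_lengths out) := by unfold Spec_encode_huffman_tables; infer_instance

-- ===== CLAIM (what is proved, stated in full; the proofs are below) =====
def Claim_equal_encode_huffman_tables : Prop := ∀ (all_lengths : List Int), Dom_encode_huffman_tables all_lengths → Spec_encode_huffman_tables all_lengths (encode_huffman_tables all_lengths)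

-- ===== LEMMAS AND PROOFS =====

-- proof-side helper: length of the leading run of value v
def pvRunLen (v : Int) : List Int → Nat
  | [] => 0
  | x :: r => if x = v then pvRunLen v r + 1 else 0

theorem pvDecRunHelper (x : Int) (r : List Int) :
    (r.drop (pvRunLen x r + 1 - 1)).length < (x :: r).length := by simp

-- proof-side helper: the groups computed left-to-right (groupby style)
def pvGroupsL : List Int → List (Int × Nat)
  | [] => []
  | x :: r => (x, pvRunLen x r + 1) :: pvGroupsL (r.drop (pvRunLen x r + 1 - 1))
  termination_by xs => xs.length
  decreasing_by exact pvDecRunHelper x r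

theorem groupsL_cons (x : Int) (r : List Int) :
    pvGroupsL (x :: r) = pvStep x (pvGroupsL r) := by
  cases r with
  | nil => simp [pvGroupsL, pvStep, pvRunLen]
  | cons y r' =>
    by_cases h : y = x
    · rw [pvGroupsL, pvGroupsL, pvStep]
      simp [pvRunLen, h]
    · have h0 : pvRunLen x (y :: r') = 0 := by simp [pvRunLen, h]
      rw [pvGroupsL, h0]
      simp only [Nat.zero_add]
      rw [pvGroupsL, pvStep, if_neg h]
      simp only [show (1:Nat) - 1 = 0 from rfl, List.drop_zero]
      rw [pvGroupsL]

theorem groupsR_eq_groupsL (xs : List Int) : pvGroupsR xs = pvGroupsL xs := by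
  induction xs with
  | nil => simp [pvGroupsR, pvGroupsL]
  | cons x r ih => rw [pvGroupsR, List.foldr_cons, ← pvGroupsR, ih, groupsL_cons]

set_option maxRecDepth 4000 in
theorem consume_eq_zeroClosed (run : Nat) : pvConsume run = pvZeroClosed run := by
  induction run using Nat.strong_induction_on with
  | _ run ih =>
    by_cases h138 : 138 ≤ run
    · have hmin : min run 138 = 138 := by omega
      have hdiv : run / 138 = (run - 138) / 138 + 1 := by omega
      have hmod : run % 138 = (run - 138) % 138 := by omega
      rw [pvConsume, dif_neg (by omega : ¬ run = 0), if_pos (by omega : 11 ≤ run), hmin,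
        ih (run - 138) (by omega)]
      simp only [pvZeroClosed, hdiv, hmod, List.replicate_succ, List.cons_append]
      norm_num
    · have hdiv : run / 138 = 0 := by omega
      have hmod : run % 138 = run := by omega
      by_cases h11 : 11 ≤ run
      · have hmin : min run 138 = run := by omega
        rw [pvConsume, dif_neg (by omega : ¬ run = 0), if_pos h11, hmin, Nat.sub_self]
        simp only [pvZeroClosed, hdiv, hmod, if_pos h11, List.replicate_zero, List.nil_append]
        simp [pvConsume]
      · by_cases h3 : 3 ≤ run
        · have hmin : min run 10 = run := by omega
          rw [pvConsume, dif_neg (by omega : ¬ run = 0), if_neg h11, if_pos h3, hmin, Nat.sub_self]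
          simp only [pvZeroClosed, hdiv, hmod, if_neg h11, if_pos h3,
            List.replicate_zero, List.nil_append]
          simp [pvConsume]
        · simp only [pvZeroClosed, hdiv, hmod, if_neg h11, if_neg h3,
            List.replicate_zero, List.nil_append]
          interval_cases run
          · simp [pvConsume]
          · rw [pvConsume]
            simp [pvConsume, List.replicate]
          · rw [pvConsume]
            rw [pvConsume]
            simp [pvConsume, List.replicate]

theorem czr_eq_runLen (r : List Int) : pvCzr r = pvRunLen 0 r := by
  induction r with
  | nil => rfl
  | cons x r ih => simp [pvCzr, pvRunLen, ih]

theorem runLen_split (r : List Int) (v : Int) :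
    r = List.replicate (pvRunLen v r) v ++ r.drop (pvRunLen v r) := by
  induction r generalizing v with
  | nil => rfl
  | cons x r ih =>
    by_cases h : x = v
    · rw [pvRunLen, if_pos h]
      simp only [List.replicate_succ, List.cons_append, List.drop_succ_cons]
      rw [h, ← ih v]
    · rw [pvRunLen, if_neg h]
      simp

theorem aLoop_replicate (m : Nat) (v : Int) (t : List Int) (hv : v ≠ 0) :
    pvALoop (List.replicate m v ++ t) =
      (List.replicate m v ++ (pvALoop t).1,
       List.replicate m ((0 : Int), (0 : Int)) ++ (pvALoop t).2) := by
  induction m with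
  | zero => simp
  | succ m ih =>
    rw [List.replicate_succ, List.cons_append, pvALoop, dif_neg hv, ih]
    simp [List.replicate_succ]

theorem aLoop_eq_emitAll (xs : List Int) : pvALoop xs = pvEmitAll (pvGroupsL xs) := by
  induction xs using pvGroupsL.induct with
  | case1 => simp [pvALoop, pvGroupsL, pvEmitAll]
  | case2 x r ih =>
    rw [pvGroupsL, pvEmitAll]
    by_cases hx : x = 0
    · rw [pvALoop, dif_pos hx]
      have hczr : pvCzr (x :: r) = pvRunLen x r + 1 := by
        rw [pvCzr, if_pos hx, czr_eq_runLen, hx]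
      have hdropeq : (x :: r).drop (pvCzr (x :: r)) = r.drop (pvRunLen x r + 1 - 1) := by
        rw [hczr]; simp
      rw [hdropeq, hczr, ih, consume_eq_zeroClosed]
      have hg : pvEmit x (pvRunLen x r + 1) = pvZeroClosed (pvRunLen x r + 1) := by
        rw [pvEmit, if_neg (by simp [hx])]
      rw [hg]
    · have hsplit : x :: r = List.replicate (pvRunLen x r + 1) x ++ r.drop (pvRunLen x r + 1 - 1) := by
        simp only [List.replicate_succ, List.cons_append, Nat.add_sub_cancel]
        rw [← runLen_split r x]
      rw [hsplit, aLoop_replicate _ x _ hx, ih]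
      have hg : pvEmit x (pvRunLen x r + 1) =
          (List.replicate (pvRunLen x r + 1) x,
           List.replicate (pvRunLen x r + 1) ((0 : Int), (0 : Int))) := by
        rw [pvEmit, if_pos hx]
      rw [hg]

-- ===== VERDICT (by name: the statement is the Claim_ definition above) =====
theorem encode_huffman_tables_spec : Claim_equal_encode_huffman_tables := by
  intro xs _
  unfold Spec_encode_huffman_tables encode_huffman_tables encode_huffman_tables_alt
  rw [groupsR_eq_groupsL]
  exact aLoop_eq_emitAll xs
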